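-- pv_equiv track=rewrite | github.com/RussellDash332/practice-makes-perfect | Mock/Midterm/mock-midterm-solutions.py | obtain_powerpoint_better
-- ===== SOURCE A (Python) =====
-- def obtain_powerpoint_better(account, brawler, points):
--     balance = account[0] - 2*points
--     brawlers = ()
--     exist = False
--     for i in account[1]:
--         if i[0] == brawler:
--             exist = True
--             # There might be a simpler solution but this works
--             excess = max(550, i[1]+points)-550
--             brawlers += ((i[0], min(550, i[1]+points)),)
--             balance += 2*excess
--         else:
--             brawlers += (i,)
--
--     if not exist:
--         brawlers += ((brawler, points),)
--
--     return (balance, brawlers)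
-- ===== SOURCE B (Python) =====
-- def obtain_powerpoint_better(account, brawler, points):
--     def go(entries, k):
--         # recurse to the end first, then build the result back-to-front by
--         # prepending; threads only the total excess and a found flag upward
--         if k == len(entries):
--             return (0, (), False)
--         name, val = entries[k]
--         exc, tail, found = go(entries, k + 1)
--         if name == brawler:
--             return (exc + max(550, val + points) - 550,
--                     ((name, min(550, val + points)),) + tail, True)
--         return (exc, ((name, val),) + tail, found)
--
--     exc, brawlers, found = go(account[1], 0)
--     if not found:
--         brawlers += ((brawler, points),)
--     return (account[0] - 2 * points + 2 * exc, brawlers)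
-- ===== Notes on version B (the rewrite author's own statement) =====
-- stated objective: alternative
-- what changed: Replaces A's forward loop that threads balance/brawlers/exist through mutable accumulators with a structural recursion that descends to the end of the list first and builds the updated brawler tuple back-to-front by prepending on the way out, passing only the total excess and a found flag upward; the balance is computed once at the end.
import Mathlib
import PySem

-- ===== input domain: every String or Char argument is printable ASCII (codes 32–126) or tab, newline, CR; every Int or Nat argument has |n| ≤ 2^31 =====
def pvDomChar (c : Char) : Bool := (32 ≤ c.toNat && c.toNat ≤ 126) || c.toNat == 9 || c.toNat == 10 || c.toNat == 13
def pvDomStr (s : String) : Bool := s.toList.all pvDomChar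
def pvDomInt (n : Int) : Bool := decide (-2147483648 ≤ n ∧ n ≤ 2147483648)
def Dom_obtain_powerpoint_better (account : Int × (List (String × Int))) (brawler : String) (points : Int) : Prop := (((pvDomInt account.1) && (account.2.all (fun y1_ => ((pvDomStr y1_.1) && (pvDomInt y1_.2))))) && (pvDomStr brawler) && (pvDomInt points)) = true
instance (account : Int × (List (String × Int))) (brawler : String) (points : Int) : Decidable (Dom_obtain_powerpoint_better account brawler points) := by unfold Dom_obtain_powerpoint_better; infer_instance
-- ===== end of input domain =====

-- B replaces A's forward accumulating loop by a structural recursion that builds the result back-to-front, threading only the excess total and a found flag; alternative decomposition, same cost.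


-- ===== PORT A =====
-- one forward loop threading (balance, brawlers, exist), then the 'if not exist' append
def obtain_powerpoint_better (account : Int × (List (String × Int))) (brawler : String) (points : Int) : Int × (List (String × Int)) :=
  let st := account.2.foldl
    (fun (s : Int × List (String × Int) × Bool) i =>
      if i.1 == brawler then
        (s.1 + 2 * (max 550 (i.2 + points) - 550), s.2.1 ++ [(i.1, min 550 (i.2 + points))], true)
      else
        (s.1, s.2.1 ++ [i], s.2.2))
    (account.1 - 2 * points, [], false)
  if !st.2.2 then (st.1, st.2.1 ++ [(brawler, points)]) else (st.1, st.2.1)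

-- ===== PORT B =====
-- structural recursion: recurse to the end, build the list back-to-front by consing,
-- thread only (total excess, found) upward (Source B's go)
def oppbGo (brawler : String) (points : Int) : List (String × Int) → Int × List (String × Int) × Bool
  | [] => (0, [], false)
  | (name, val) :: rest =>
    let r := oppbGo brawler points rest
    if name == brawler then
      (r.1 + (max 550 (val + points) - 550), (name, min 550 (val + points)) :: r.2.1, true)
    else
      (r.1, (name, val) :: r.2.1, r.2.2)

def obtain_powerpoint_better_alt (account : Int × (List (String × Int))) (brawler : String) (points : Int) : Int × (List (String × Int)) :=
  let r := oppbGo brawler points account.2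
  let brawlers := if !r.2.2 then r.2.1 ++ [(brawler, points)] else r.2.1
  (account.1 - 2 * points + 2 * r.1, brawlers)

-- ===== PRECONDITION & SPEC =====
def Spec_obtain_powerpoint_better (account : Int × (List (String × Int))) (brawler : String) (points : Int) (out : Int × (List (String × Int))) : Prop := out = obtain_powerpoint_better_alt account brawler points
instance (account : Int × (List (String × Int))) (brawler : String) (points : Int) (out : Int × (List (String × Int))) : Decidable (Spec_obtain_powerpoint_better account brawler points out) := by unfold Spec_obtain_powerpoint_better; infer_instance

-- ===== CLAIM (what is proved, stated in full; the proofs are below) =====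
def Claim_equal_obtain_powerpoint_better : Prop := ∀ (account : Int × (List (String × Int))) (brawler : String) (points : Int), Dom_obtain_powerpoint_better account brawler points → Spec_obtain_powerpoint_better account brawler points (obtain_powerpoint_better account brawler points)

-- ===== LEMMAS AND PROOFS =====

-- A's fold state from an arbitrary initial state equals B's back-to-front recursion result
-- composed with that initial state.
theorem oppb_fold_eq_go (brawler : String) (points : Int) (l : List (String × Int))
    (s : Int × List (String × Int) × Bool) :
    l.foldl
      (fun (s : Int × List (String × Int) × Bool) i =>
        if i.1 == brawler then
          (s.1 + 2 * (max 550 (i.2 + points) - 550), s.2.1 ++ [(i.1, min 550 (i.2 + points))], true)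
        else
          (s.1, s.2.1 ++ [i], s.2.2)) s
    = (s.1 + 2 * (oppbGo brawler points l).1,
       s.2.1 ++ (oppbGo brawler points l).2.1,
       s.2.2 || (oppbGo brawler points l).2.2) := by
  induction l generalizing s with
  | nil => simp [oppbGo]
  | cons h t ih =>
    obtain ⟨name, val⟩ := h
    by_cases hh : name == brawler
    · simp only [List.foldl_cons, hh, if_true, ih, oppbGo]
      refine Prod.ext ?_ (Prod.ext ?_ ?_) <;> simp [hh]
      ring
    · simp only [List.foldl_cons, hh, if_false, ih, oppbGo, Bool.false_eq_true]
      refine Prod.ext ?_ (Prod.ext ?_ ?_) <;> simp [hh]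

-- ===== VERDICT (by name: the statement is the Claim_ definition above) =====
theorem obtain_powerpoint_better_spec : Claim_equal_obtain_powerpoint_better := by
  intro account brawler points _
  unfold Spec_obtain_powerpoint_better obtain_powerpoint_better obtain_powerpoint_better_alt
  simp only [oppb_fold_eq_go]
  by_cases hex : (oppbGo brawler points account.2).2.2 <;> simp [hex]
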